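-- pv_equiv track=rewrite | github.com/lbartell/bunnies | cake/solution.py | solution
-- ===== SOURCE A (Python) =====
-- def solution(s):
--     """Compute maximum number of equal slices that the cake can be divided into
--
--     Args:
--         s: str, a string describing the sequence of M&Ms. String should...
--             be non-empty,
--             have less than 200 chars, and
--             contain one unique character (case-sensitive) for each M&M color.
--
--     Returns:
--         num_slices: int, maximum number of equal parts that can be cut from the cake without leaving any leftovers
--     """
--
--     # Default to 1 slice
--     num_slices = 1
--
--     # The factors of the number of M&Ms define the set of potential options for number of cake slices
--     num_m_and_ms = len(s)
--     possible_num_slices = _factors(num_m_and_ms)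
--
--     # Check each option for number of slices, starting with the largest
--     for num_slices in sorted(possible_num_slices, reverse=True):
--         slice_size = num_m_and_ms // num_slices
--         slices = set(_chunks(s, slice_size))
--
--         # If there is only one unique slice in the set of slices, then we found a valid result
--         if len(slices) == 1:
--             break
--
--     return num_slices
--
-- def _chunks(list_to_chunk, chunk_size):
--     """Generator yielding chunks of the given size from the given list
--
--     Args:
--         list_to_chunk: list (or similar) of objects to yield in chunks
--         chunk_size: length of chunk to return
--
--     Yields:
--         chunk: iterable of length chunk_size from the original list
--     """
--     for index in range(0, len(list_to_chunk), chunk_size):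
--         yield list_to_chunk[index: index + chunk_size]
--
-- def _factors(num):
--     """Get a list of factors of the given number
--
--     Args:
--         num: integer number
--
--     Returns:
--         list of factors, integers that divide evenly into the number
--     """
--     if num < 1:
--         raise ValueError("Factor computation is only valid for non-zero positive integers")
--     return [val for val in range(1, num + 1) if num % val == 0]
-- ===== SOURCE B (Python) =====
-- def solution(s):
--     """Maximum number of equal slices the cake divides into.
--
--     Single ascending scan over candidate slice sizes: the first divisor d of
--     len(s) such that s is the prefix s[:d] repeated gives the answer len(s)//d.
--     """
--     n = len(s)
--     for d in range(1, n + 1):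
--         if n % d == 0 and s == s[:d] * (n // d):
--             return n // d
--     return 1
-- ===== Notes on version B (the rewrite author's own statement) =====
-- stated objective: simpler
-- what changed: Replaces A's factor-list construction, reverse sort, chunk generator and set-of-chunks cardinality test by a single ascending for-loop over slice sizes that returns n//d at the first divisor d whose prefix s[:d] repeated rebuilds s.
-- outside the precondition, e.g. on solution(''): A raises ValueError, B returns 1
import Mathlib
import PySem

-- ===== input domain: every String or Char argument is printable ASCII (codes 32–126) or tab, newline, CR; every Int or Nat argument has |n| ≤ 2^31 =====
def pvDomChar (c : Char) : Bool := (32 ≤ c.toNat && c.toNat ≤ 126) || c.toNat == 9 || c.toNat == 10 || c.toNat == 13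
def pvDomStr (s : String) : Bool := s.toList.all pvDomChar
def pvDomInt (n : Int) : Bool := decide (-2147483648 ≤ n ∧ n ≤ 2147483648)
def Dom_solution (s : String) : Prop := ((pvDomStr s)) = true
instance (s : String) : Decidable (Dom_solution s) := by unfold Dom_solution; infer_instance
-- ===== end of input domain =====

-- B replaces A's factor list + reverse sort + set-of-chunks test by one ascending scan over
-- slice sizes with a repeated-prefix check (objective: simpler).

-- ===== PORT A =====
-- _factors(num) for num ≥ 1 (the num < 1 ValueError is excluded by Pre_solution)
def pvFactorsA (n : Int) : List Int :=
  (PySem.List.pyRange 1 (n + 1) 1).filter (fun v => PySem.Int.mod n v == 0)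

-- list(_chunks(s, cs)) : the generator materialised
def pvChunksA (l : List Char) (cs : Int) : List (List Char) :=
  (PySem.List.pyRange 0 (PySem.List.len l) cs).map
    (fun i => PySem.List.slice l (some i) (some (i + cs)))

-- the 'for num_slices in sorted(...): ... break' loop; acc = current num_slices binding
def pvLoopA (l : List Char) (n : Int) : List Int → Int → Int
  | [], acc => acc
  | k :: rest, _ =>
    let sliceSize := PySem.Int.floordiv n k
    let slices : PySem.Set (List Char) := PySem.Set.ofList (pvChunksA l sliceSize)
    if PySem.Set.len slices == (1 : Int) then k else pvLoopA l n rest k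

def solution (s : String) : Int :=
  pvLoopA s.toList (PySem.Str.len s)
    (PySem.List.sorted (pvFactorsA (PySem.Str.len s)) (fun x => x) true) 1

-- ===== PORT B =====
-- s[:d] * (n // d) ported as flatten ∘ replicate; .toNat is exact since n // d ≥ 0 for d ≥ 1
def pvLoopB (l : List Char) (n : Int) : List Int → Int
  | [] => 1
  | d :: rest =>
    if PySem.Int.mod n d == 0 &&
       l == List.flatten (List.replicate (PySem.Int.floordiv n d).toNat
              (PySem.List.slice l none (some d)))
    then PySem.Int.floordiv n d
    else pvLoopB l n rest

def solution_alt (s : String) : Int :=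
  pvLoopB s.toList (PySem.Str.len s) (PySem.List.pyRange 1 (PySem.Str.len s + 1) 1)

-- ===== PRECONDITION & SPEC =====
-- Pre_ excludes only the empty string, on which A's _factors raises ValueError (B returns 1 there).
def Pre_solution (s : String) : Prop := s ≠ ""
instance (s : String) : Decidable (Pre_solution s) := by unfold Pre_solution; infer_instance
def pvWitness_solution : String := "abab"

def Spec_solution (s : String) (out : Int) : Prop := out = solution_alt s
instance (s : String) (out : Int) : Decidable (Spec_solution s out) := by unfold Spec_solution; infer_instance

-- ===== CLAIM (what is proved, stated in full; the proofs are below) =====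
def Claim_equal_solution : Prop := ∀ (s : String), Dom_solution s → Pre_solution s → Spec_solution s (solution s)

-- ===== LEMMAS AND PROOFS =====

-- Nat-level reference objects used only by the proofs
def pvChunksC (l : List Char) (d k : Nat) : List (List Char) :=
  (List.range k).map (fun j => (l.drop (j * d)).take d)
def pvP (l : List Char) (d : Nat) : Bool :=
  (l.length % d == 0) && (l == List.flatten (List.replicate (l.length / d) (l.take d)))
def pvQ (l : List Char) (k : Nat) : Bool :=
  (PySem.Set.ofList (pvChunksC l (l.length / k)
    ((l.length + l.length / k - 1) / (l.length / k)))).length == 1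
def pvNatB (l : List Char) : List Nat → Nat
  | [] => 1
  | d :: rest => if pvP l d then l.length / d else pvNatB l rest
def pvNatA (l : List Char) : List Nat → Nat → Nat
  | [], acc => acc
  | k :: rest, _ => if pvQ l k then k else pvNatA l rest k
def pvDivs (n : Nat) : List Nat :=
  ((List.range n).map (· + 1)).filter (fun d => n % d == 0)

lemma pv_find?_first {α : Type} (p : α → Bool) (lt : α → α → Prop) :
    ∀ (xs : List α), xs.Pairwise lt → ∀ a ∈ xs, p a = true →
      (∀ b ∈ xs, lt b a → p b = false) → xs.find? p = some a := by
  intro xs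
  induction xs with
  | nil => intro _ a ha; cases ha
  | cons x t ih =>
    intro hpw a ha hpa hmin
    rcases List.pairwise_cons.mp hpw with ⟨hx, ht⟩
    by_cases hxa : x = a
    · subst hxa; simp [hpa]
    · rcases List.mem_cons.mp ha with rfl | ha
      · exact absurd rfl hxa
      · have hltxa : lt x a := hx a ha
        have hpx : p x = false := hmin x (List.mem_cons_self) hltxa
        simp [hpx]
        exact ih ht a ha hpa (fun b hb hlb => hmin b (List.mem_cons_of_mem _ hb) hlb)

lemma pv_setlen1 (a : List Char) (xs : List (List Char)) :
    ((PySem.Set.ofList (a :: xs)).length = 1) ↔ ∀ x ∈ xs, x = a := by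
  rw [PySem.Set.ofList_cons]
  simp only [List.length_cons]
  constructor
  · intro h
    have hlen : ((PySem.Set.ofList xs).discard a).length = 0 := by omega
    have h0 : ((PySem.Set.ofList xs).discard a) = [] := List.length_eq_zero_iff.mp hlen
    intro x hx
    by_contra hne
    have : x ∈ (PySem.Set.ofList xs).discard a := by
      rw [PySem.Set.mem_discard]
      exact ⟨(PySem.Set.mem_ofList _ _).mpr hx, hne⟩
    simp [h0] at this
  · intro h
    have h0 : ((PySem.Set.ofList xs).discard a) = [] := by
      rw [List.eq_nil_iff_forall_not_mem]
      intro x hx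
      rw [PySem.Set.mem_discard] at hx
      exact hx.2 (h x ((PySem.Set.mem_ofList _ _).mp hx.1))
    simp [h0]

lemma pv_chunksC_succ (l : List Char) (d k : Nat) :
    pvChunksC l d (k + 1) = l.take d :: pvChunksC (l.drop d) d k := by
  unfold pvChunksC
  rw [List.range_succ_eq_map]
  simp [List.map_map, Function.comp_def, Nat.add_mul, List.drop_drop, Nat.add_comm]

lemma pv_flatten_chunksC (d : Nat) : ∀ (k : Nat) (l : List Char), l.length = k * d →
    (pvChunksC l d k).flatten = l := by
  intro k
  induction k with
  | zero => intro l hl; simp [pvChunksC, List.eq_nil_of_length_eq_zero (by omega : l.length = 0)]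
  | succ k ih =>
    intro l hl
    rw [pv_chunksC_succ, List.flatten_cons, ih (l.drop d) (by simp [hl]; ring_nf; omega)]
    exact List.take_append_drop d l

lemma pv_chunksC_of_rep (d : Nat) (c : List Char) (hc : c.length = d) :
    ∀ (k : Nat) (l : List Char), l = (List.replicate k c).flatten →
      pvChunksC l d k = List.replicate k c := by
  intro k
  induction k with
  | zero => intro l hl; simp [pvChunksC]
  | succ k ih =>
    intro l hl
    rw [List.replicate_succ, List.flatten_cons] at hl
    subst hl
    rw [pv_chunksC_succ, List.take_left' hc, List.drop_left' hc,
      ih _ rfl, List.replicate_succ]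

lemma pv_chunks_iff_rep (l : List Char) (d : Nat) (hd : 0 < d) (hdvd : d ∣ l.length)
    (hn : 0 < l.length) :
    ((PySem.Set.ofList (pvChunksC l d (l.length / d))).length = 1) ↔
      l = List.flatten (List.replicate (l.length / d) (l.take d)) := by
  have hkd : l.length = (l.length / d) * d := (Nat.div_mul_cancel hdvd).symm
  have hkpos : 0 < l.length / d := Nat.div_pos (Nat.le_of_dvd hn hdvd) hd
  have hc : (l.take d).length = d := by
    simp
    exact Nat.le_of_dvd hn hdvd
  obtain ⟨m, hm⟩ : ∃ m, l.length / d = m + 1 := ⟨l.length / d - 1, by omega⟩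
  rw [hm] at hkd ⊢
  rw [pv_chunksC_succ, pv_setlen1]
  constructor
  · intro h
    have hall : ∀ x ∈ pvChunksC l d (m + 1), x = l.take d := by
      rw [pv_chunksC_succ]
      intro x hx
      rcases List.mem_cons.mp hx with rfl | hx
      · rfl
      · exact h x hx
    have hrep : pvChunksC l d (m + 1) = List.replicate (m + 1) (l.take d) := by
      have hlen : (pvChunksC l d (m + 1)).length = m + 1 := by simp [pvChunksC]
      have h2 := List.eq_replicate_of_mem hall
      rwa [hlen] at h2
    have := pv_flatten_chunksC d (m + 1) l hkd
    rw [hrep] at this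
    exact this.symm
  · intro h
    have hrep := pv_chunksC_of_rep d (l.take d) hc (m + 1) l h
    rw [pv_chunksC_succ, List.replicate_succ] at hrep
    intro x hx
    have : x ∈ List.replicate m (l.take d) := by
      rw [← (List.cons.injEq _ _ _ _).mp hrep |>.2]
      exact hx
    exact List.eq_of_mem_replicate this

lemma pv_beq_cast (a b : Nat) : ((a : Int) == (b : Int)) = (a == b) := by
  by_cases h : a = b <;> simp [h]

lemma pv_loopB_cast (l : List Char) (ds : List Nat) :
    pvLoopB l (l.length : Int) (List.map (fun d : Nat => (d : Int)) ds) = ((pvNatB l ds : Nat) : Int) := by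
  induction ds with
  | nil => simp [pvLoopB, pvNatB]
  | cons d rest ih =>
    rw [List.map_cons]
    unfold pvLoopB pvNatB
    have hcond : (PySem.Int.mod (l.length : Int) (d : Int) == 0 &&
        (l == List.flatten (List.replicate (PySem.Int.floordiv (l.length : Int) (d : Int)).toNat
          (PySem.List.slice l none (some (d : Int)))))) = pvP l d := by
      rw [PySem.Int.mod_natCast, PySem.Int.floordiv_natCast, PySem.List.slice_to_natCast]
      simp only [pvP, Int.toNat_natCast]
      congr 1
      by_cases h : l.length % d = 0 <;> simp [h, Int.natCast_dvd_natCast, Nat.dvd_iff_mod_eq_zero]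
    rw [hcond]
    by_cases hp : pvP l d
    · simp [hp, PySem.Int.floordiv_natCast]
    · simp [hp, ih]

lemma pv_chunksA_cast (l : List Char) (d : Nat) (hd : 0 < d) (hn : 0 < l.length) :
    pvChunksA l (d : Int) = pvChunksC l d ((l.length + d - 1) / d) := by
  unfold pvChunksA pvChunksC
  rw [PySem.List.len_eq, PySem.List.pyRange_of_pos 0 (l.length : Int) (by exact_mod_cast hd)]
  have hif : (if (0:Int) < (l.length : Int) then (((l.length : Int) - 0 + ↑d - 1) / ↑d).toNat else 0)
      = (l.length + d - 1) / d := by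
    rw [if_pos (by exact_mod_cast hn)]
    have h1 : ((l.length : Int) - 0 + ↑d - 1) = ((l.length + d - 1 : Nat) : Int) := by omega
    rw [h1, ← Int.natCast_div, Int.toNat_natCast]
  rw [hif, List.map_map]
  apply List.map_congr_left
  intro j hj
  have h1 : ((0 : Int) + (d : Int) * (j : Int)) = ((j * d : Nat) : Int) := by push_cast; ring
  show PySem.List.slice l (some (0 + (d:Int) * (j:Int))) (some (0 + (d:Int) * (j:Int) + (d:Int)))
      = (l.drop (j * d)).take d
  rw [h1, PySem.List.slice_natCast_add]

lemma pv_loopA_cast (l : List Char) (hn : 0 < l.length) : ∀ (ks : List Nat) (acc : Nat),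
    (∀ k ∈ ks, 0 < k ∧ k ≤ l.length) →
    pvLoopA l (l.length : Int) (List.map (fun k : Nat => (k : Int)) ks) (acc : Int)
      = ((pvNatA l ks acc : Nat) : Int) := by
  intro ks
  induction ks with
  | nil => intro acc _; simp [pvLoopA, pvNatA]
  | cons k rest ih =>
    intro acc hmem
    obtain ⟨hk, hkn⟩ := hmem k List.mem_cons_self
    have hd : 0 < l.length / k := Nat.div_pos hkn hk
    rw [List.map_cons]
    have hf : PySem.Int.floordiv (l.length : Int) (k : Int) = ((l.length / k : Nat) : Int) :=
      PySem.Int.floordiv_natCast _ _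
    simp only [pvLoopA, pvNatA, hf, pv_chunksA_cast l _ hd hn]
    have hcond : (PySem.Set.len (PySem.Set.ofList
        (pvChunksC l (l.length / k) ((l.length + l.length / k - 1) / (l.length / k)))) == (1 : Int))
        = pvQ l k := by
      unfold pvQ
      rw [show (1 : Int) = ((1 : Nat) : Int) from rfl]
      simp only [PySem.Set.len, pv_beq_cast]
    rw [hcond]
    by_cases hq : pvQ l k
    · simp [hq]
    · simp only [hq, if_false, Bool.false_eq_true]
      exact ih k (fun b hb => hmem b (List.mem_cons_of_mem _ hb))

lemma pv_factors_cast (n : Nat) :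
    pvFactorsA (n : Int) = List.map (fun d : Nat => (d : Int)) (pvDivs n) := by
  unfold pvFactorsA pvDivs
  rw [PySem.List.pyRange_one]
  have h1 : ((n : Int) + 1 - 1).toNat = n := by omega
  rw [h1, List.filter_map, List.filter_map, List.map_map]
  have h2 : ∀ xs : List Nat,
      xs.filter ((fun v => PySem.Int.mod (n:Int) v == 0) ∘ fun k => (1:Int) + ↑k)
      = xs.filter ((fun d => n % d == 0) ∘ (· + 1)) := by
    intro xs
    apply List.filter_congr
    intro x _
    show (PySem.Int.mod (n : Int) (1 + (x : Int)) == 0) = (n % (x + 1) == 0)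
    have h3 : ((1 : Int) + (x : Int)) = ((x + 1 : Nat) : Int) := by push_cast; ring
    rw [h3, PySem.Int.mod_natCast, show (0 : Int) = ((0 : Nat) : Int) from rfl, pv_beq_cast]
  rw [h2]
  apply List.map_congr_left
  intro x _
  show (1 : Int) + (x : Int) = (((x + 1 : Nat) : Nat) : Int)
  push_cast; ring

lemma pv_divs_pairwise (n : Nat) : (pvDivs n).Pairwise (· < ·) := by
  unfold pvDivs
  apply List.Pairwise.filter
  rw [List.pairwise_map]
  exact List.pairwise_lt_range.imp (by omega)

lemma pv_sorted_factors (n : Nat) :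
    PySem.List.sorted (pvFactorsA (n : Int)) (fun x => x) true
      = List.map (fun d : Nat => (d : Int)) (pvDivs n).reverse := by
  rw [pv_factors_cast]
  apply PySem.List.sorted_rev_eq_of_perm_of_pairwise_gt
  · exact (List.reverse_perm _).map _
  · rw [List.pairwise_map, List.pairwise_reverse]
    exact (pv_divs_pairwise n).imp (by intro a b h; exact_mod_cast h)

lemma pv_mem_divs (n d : Nat) : d ∈ pvDivs n ↔ 1 ≤ d ∧ d ≤ n ∧ d ∣ n := by
  unfold pvDivs
  simp only [List.mem_filter, List.mem_map, List.mem_range]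
  constructor
  · rintro ⟨⟨k, hk, rfl⟩, h⟩
    refine ⟨by omega, by omega, ?_⟩
    rw [Nat.dvd_iff_mod_eq_zero]
    simpa using h
  · rintro ⟨h1, h2, h3⟩
    refine ⟨⟨d - 1, by omega, by omega⟩, ?_⟩
    simp [Nat.mod_eq_zero_of_dvd h3]

lemma pv_natB_find (l : List Char) : ∀ ds : List Nat,
    pvNatB l ds = (match ds.find? (pvP l) with | some d => l.length / d | none => 1) := by
  intro ds
  induction ds with
  | nil => simp [pvNatB]
  | cons d rest ih =>
    by_cases h : pvP l d <;> simp [pvNatB, h, ih]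

lemma pv_natA_find (l : List Char) : ∀ (ks : List Nat) (acc k0 : Nat),
    ks.find? (pvQ l) = some k0 → pvNatA l ks acc = k0 := by
  intro ks
  induction ks with
  | nil => intro acc k0 h; simp at h
  | cons k rest ih =>
    intro acc k0 h
    by_cases hq : pvQ l k
    · rw [List.find?_cons_of_pos hq] at h
      simp only [pvNatA, hq, if_true]
      exact (Option.some.injEq _ _).mp h
    · rw [List.find?_cons_of_neg hq] at h
      simp only [pvNatA, hq, Bool.false_eq_true, if_false]
      exact ih k k0 h

lemma pv_count_eq (n d : Nat) (hd : 0 < d) (hdvd : d ∣ n) : (n + d - 1) / d = n / d := by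
  obtain ⟨m, rfl⟩ := hdvd
  rw [Nat.mul_div_cancel_left m hd]
  have h1 : d * m + d - 1 = (d - 1) + m * d := by
    rw [Nat.mul_comm]; omega
  rw [h1, Nat.add_mul_div_right _ _ hd, Nat.div_eq_of_lt (by omega)]
  omega

lemma pv_q_iff (l : List Char) (k : Nat) (hk : 0 < k) (hkd : k ∣ l.length)
    (hn : 0 < l.length) :
    (pvQ l k = true) ↔ l = List.flatten (List.replicate k (l.take (l.length / k))) := by
  have hd : 0 < l.length / k := Nat.div_pos (Nat.le_of_dvd hn hkd) hk
  have hdvd : l.length / k ∣ l.length := Nat.div_dvd_of_dvd hkd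
  have hkk : l.length / (l.length / k) = k := Nat.div_div_self hkd (by omega)
  unfold pvQ
  rw [pv_count_eq _ _ hd hdvd, beq_iff_eq, pv_chunks_iff_rep l _ hd hdvd hn, hkk]

lemma pv_main (l : List Char) (hl : l ≠ []) :
    pvNatA l (pvDivs l.length).reverse 1 = pvNatB l ((List.range l.length).map (· + 1)) := by
  have hn : 0 < l.length := List.length_pos_iff.mpr hl
  have hex : ∃ d, pvP l d = true := by
    refine ⟨l.length, ?_⟩
    simp [pvP, Nat.mod_self, Nat.div_self hn, List.take_length]
  set d0 := Nat.find hex with hd0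
  have hp0 : pvP l d0 = true := Nat.find_spec hex
  have hmin : ∀ m, m < d0 → pvP l m = false := by
    intro m hm
    have := Nat.find_min hex hm
    simpa using this
  have hd0dvd : d0 ∣ l.length := by
    have h1 := hp0
    unfold pvP at h1
    rw [Bool.and_eq_true, beq_iff_eq] at h1
    exact Nat.dvd_of_mod_eq_zero h1.1
  have hd0pos : 0 < d0 := by
    rcases Nat.eq_zero_or_pos d0 with h | h
    · exfalso
      have h1 := hp0
      unfold pvP at h1
      rw [h] at h1
      rw [Bool.and_eq_true, beq_iff_eq] at h1
      omega
    · exact h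
  have hd0le : d0 ≤ l.length := Nat.le_of_dvd hn hd0dvd
  have hrep0 : l = List.flatten (List.replicate (l.length / d0) (l.take d0)) := by
    have h1 := hp0
    unfold pvP at h1
    rw [Bool.and_eq_true, beq_iff_eq] at h1
    exact eq_of_beq h1.2
  -- B side
  have hBfind : ((List.range l.length).map (· + 1)).find? (pvP l) = some d0 := by
    apply pv_find?_first (pvP l) (· < ·)
    · rw [List.pairwise_map]
      exact List.pairwise_lt_range.imp (by omega)
    · simp only [List.mem_map, List.mem_range]
      exact ⟨d0 - 1, by omega, by omega⟩
    · exact hp0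
    · intro b _ hb
      exact hmin b hb
  -- A side
  have hk0 : l.length / (l.length / d0) = d0 := Nat.div_div_self hd0dvd (by omega)
  have hAfind : ((pvDivs l.length).reverse).find? (pvQ l) = some (l.length / d0) := by
    apply pv_find?_first (pvQ l) (fun a b => b < a)
    · rw [List.pairwise_reverse]
      exact pv_divs_pairwise l.length
    · rw [List.mem_reverse, pv_mem_divs]
      exact ⟨Nat.div_pos hd0le hd0pos, Nat.div_le_self _ _, Nat.div_dvd_of_dvd hd0dvd⟩
    · rw [pv_q_iff l _ (Nat.div_pos hd0le hd0pos) (Nat.div_dvd_of_dvd hd0dvd) hn, hk0]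
      exact hrep0
    · intro b hb hblt
      rw [List.mem_reverse, pv_mem_divs] at hb
      obtain ⟨hb1, hb2, hb3⟩ := hb
      have hbpos : 0 < b := hb1
      have hedvd : l.length / b ∣ l.length := Nat.div_dvd_of_dvd hb3
      have hepos : 0 < l.length / b := Nat.div_pos (Nat.le_of_dvd hn hb3) hbpos
      have hblen : l.length / (l.length / b) = b := Nat.div_div_self hb3 (by omega)
      have helt : l.length / b < d0 := by
        by_contra hge
        rw [Nat.not_lt] at hge
        have : b ≤ l.length / d0 := by
          calc b = l.length / (l.length / b) := hblen.symm
            _ ≤ l.length / d0 := Nat.div_le_div_left hge hd0pos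
        omega
      have hPe : pvP l (l.length / b) = false := hmin _ helt
      rw [Bool.eq_false_iff]
      intro hq
      rw [pv_q_iff l b hbpos hb3 hn] at hq
      have : pvP l (l.length / b) = true := by
        unfold pvP
        rw [Bool.and_eq_true, beq_iff_eq]
        refine ⟨Nat.mod_eq_zero_of_dvd hedvd, ?_⟩
        rw [beq_iff_eq, hblen]
        exact hq
      rw [hPe] at this
      cases this
  rw [pv_natA_find l _ 1 _ hAfind, pv_natB_find, hBfind]

lemma pv_range_cast (n : Nat) :
    PySem.List.pyRange 1 ((n : Int) + 1) 1
      = List.map (fun d : Nat => (d : Int)) ((List.range n).map (· + 1)) := by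
  rw [PySem.List.pyRange_one]
  have h1 : ((n : Int) + 1 - 1).toNat = n := by omega
  rw [h1, List.map_map]
  apply List.map_congr_left
  intro x _
  show (1 : Int) + (x : Int) = (((x + 1 : Nat) : Nat) : Int)
  push_cast; ring
lemma solution_ok (s : String) (hpre : s ≠ "") : solution s = solution_alt s := by
  have hl : s.toList ≠ [] := by
    intro hc
    exact hpre (by rwa [← String.toList_inj, String.toList_empty])
  have hn : 0 < s.toList.length := List.length_pos_iff.mpr hl
  unfold solution solution_alt
  rw [PySem.Str.len_eq, pv_sorted_factors, pv_range_cast, pv_loopB_cast,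
    show (1 : Int) = ((1 : Nat) : Int) from rfl,
    pv_loopA_cast s.toList hn _ 1 (by
      intro k hk
      rw [List.mem_reverse, pv_mem_divs] at hk
      exact ⟨hk.1, hk.2.1⟩)]
  exact_mod_cast congrArg (Nat.cast : Nat → Int) (pv_main s.toList hl)

-- ===== VERDICT (by name: the statement is the Claim_ definition above) =====
theorem solution_spec : Claim_equal_solution := by
  intro s _ hpre
  exact solution_ok s hpre
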